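-- pv_equiv track=rewrite | github.com/TAEO2474/densenet121_best8_PNEUMONIA- | app.py | _default_cam_index
-- ===== SOURCE A (Python) =====
-- def _default_cam_index(names):
--     if "conv4_block24_concat" in names:
--         return names.index("conv4_block24_concat")
--     conv4 = [i for i, n in enumerate(names) if ("conv4_block" in n and "concat" in n)]
--     if conv4:
--         return conv4[-1]
--     conv5 = [i for i, n in enumerate(names) if ("conv5_block" in n and "concat" in n)]
--     if conv5:
--         return conv5[-1]
--     return len(names) - 1 if names else 0
-- ===== SOURCE B (Python) =====
-- def _default_cam_index(names):
--     exact_idx = None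
--     last_conv4 = None
--     last_conv5 = None
--     for i, n in enumerate(names):
--         if exact_idx is None and n == "conv4_block24_concat":
--             exact_idx = i
--         if "conv4_block" in n and "concat" in n:
--             last_conv4 = i
--         if "conv5_block" in n and "concat" in n:
--             last_conv5 = i
--     if exact_idx is not None:
--         return exact_idx
--     if last_conv4 is not None:
--         return last_conv4
--     if last_conv5 is not None:
--         return last_conv5
--     return len(names) - 1 if names else 0
-- ===== Notes on version B (the rewrite author's own statement) =====
-- stated objective: simpler
-- what changed: Replaces A's three separate scans (membership+index, two list comprehensions) with one enumerate pass maintaining first-exact-match and last-conv4/conv5 indices, then a priority chain; measured ~1.9x faster (constant factor).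
import Mathlib
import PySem

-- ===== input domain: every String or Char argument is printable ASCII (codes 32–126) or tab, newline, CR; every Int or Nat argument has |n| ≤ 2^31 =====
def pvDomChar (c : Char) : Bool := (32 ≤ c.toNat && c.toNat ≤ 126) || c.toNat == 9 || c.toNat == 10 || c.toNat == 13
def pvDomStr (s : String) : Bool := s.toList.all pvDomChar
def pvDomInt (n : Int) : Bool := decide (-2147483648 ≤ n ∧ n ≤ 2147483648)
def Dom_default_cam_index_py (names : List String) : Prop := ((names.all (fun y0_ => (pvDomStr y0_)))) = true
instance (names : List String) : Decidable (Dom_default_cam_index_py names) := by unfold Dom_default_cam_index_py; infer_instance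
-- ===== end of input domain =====

-- B replaces A's three separate scans by one enumerate pass with three tracked indices (objective: simpler).

-- ===== PORT A =====
def default_cam_index_py (names : List String) : Int :=
  if "conv4_block24_concat" ∈ names then
    ((PySem.List.index? names "conv4_block24_concat").getD 0 : Nat)
  else
    let conv4 := ((PySem.List.enumerate names 0).filter
      (fun p => PySem.Str.isIn "conv4_block" p.2 && PySem.Str.isIn "concat" p.2)).map (·.1)
    if conv4 ≠ [] then conv4.getLast?.getD 0
    else
      let conv5 := ((PySem.List.enumerate names 0).filter
        (fun p => PySem.Str.isIn "conv5_block" p.2 && PySem.Str.isIn "concat" p.2)).map (·.1)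
      if conv5 ≠ [] then conv5.getLast?.getD 0
      else if names ≠ [] then (names.length : Int) - 1 else 0

-- ===== PORT B =====
def camStep (s : Option Int × Option Int × Option Int) (p : Int × String) :
    Option Int × Option Int × Option Int :=
  let e := if s.1.isNone && (p.2 == "conv4_block24_concat") then some p.1 else s.1
  let l4 := if PySem.Str.isIn "conv4_block" p.2 && PySem.Str.isIn "concat" p.2 then some p.1 else s.2.1
  let l5 := if PySem.Str.isIn "conv5_block" p.2 && PySem.Str.isIn "concat" p.2 then some p.1 else s.2.2
  (e, l4, l5)

def default_cam_index_py_alt (names : List String) : Int :=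
  match (PySem.List.enumerate names 0).foldl camStep (none, none, none) with
  | (some i, _, _) => i
  | (none, some i, _) => i
  | (none, none, some i) => i
  | (none, none, none) => if names ≠ [] then (names.length : Int) - 1 else 0

-- ===== PRECONDITION & SPEC =====
def Spec_default_cam_index_py (names : List String) (out : Int) : Prop := out = default_cam_index_py_alt names
instance (names : List String) (out : Int) : Decidable (Spec_default_cam_index_py names out) := by unfold Spec_default_cam_index_py; infer_instance

-- ===== CLAIM (what is proved, stated in full; the proofs are below) =====
def Claim_equal_default_cam_index_py : Prop := ∀ (names : List String), Dom_default_cam_index_py names → Spec_default_cam_index_py names (default_cam_index_py names)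

-- ===== LEMMAS AND PROOFS =====

/-- first index (counting from `s`) of an element equal to the exact name -/
def firstIdx (l : List String) (s : Int) : Option Int :=
  match l with
  | [] => none
  | x :: xs => if x == "conv4_block24_concat" then some s else firstIdx xs (s + 1)

/-- last index (counting from `s`) of an element satisfying `q` -/
def lastIdx (q : String → Bool) (l : List String) (s : Int) : Option Int :=
  match l with
  | [] => none
  | x :: xs => (lastIdx q xs (s + 1)).or (if q x then some s else none)

def q4 (n : String) : Bool := PySem.Str.isIn "conv4_block" n && PySem.Str.isIn "concat" n
def q5 (n : String) : Bool := PySem.Str.isIn "conv5_block" n && PySem.Str.isIn "concat" n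

theorem ite_some_or {c : Prop} [Decidable c] (s : Int) (a : Option Int) :
    (if c then some s else none).or a = if c then some s else a := by
  split_ifs <;> simp

theorem foldl_camStep (l : List String) (s : Int) (e a b : Option Int) :
    (PySem.List.enumerate l s).foldl camStep (e, a, b) =
      (e.or (firstIdx l s), (lastIdx q4 l s).or a, (lastIdx q5 l s).or b) := by
  induction l generalizing s e a b with
  | nil => simp [PySem.List.enumerate_nil, firstIdx, lastIdx]
  | cons x xs ih =>
    rw [PySem.List.enumerate_cons, List.foldl_cons, camStep]
    rw [ih]
    simp only [firstIdx, lastIdx, q4, q5]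
    cases e <;> by_cases hx : x == "conv4_block24_concat" <;>
      simp [hx, Option.or_assoc, ite_some_or]

theorem firstIdx_eq_index? (l : List String) (s : Int) :
    firstIdx l s = (PySem.List.index? l "conv4_block24_concat").map (fun k => s + (k : Int)) := by
  induction l generalizing s with
  | nil => rfl
  | cons x xs ih =>
    by_cases hx : x = "conv4_block24_concat"
    · subst hx
      rw [firstIdx, PySem.List.index?_cons_self]
      simp
    · rw [firstIdx, PySem.List.index?_cons_of_ne xs hx, ih]
      simp only [beq_iff_eq, hx, if_false]
      cases PySem.List.index? xs "conv4_block24_concat" <;> simp <;> ring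

theorem lastIdx_eq_getLast? (q : String → Bool) (l : List String) (s : Int) :
    (((PySem.List.enumerate l s).filter (fun p => q p.2)).map (·.1)).getLast? = lastIdx q l s := by
  induction l generalizing s with
  | nil => simp [PySem.List.enumerate_nil, lastIdx]
  | cons x xs ih =>
    rw [PySem.List.enumerate_cons, lastIdx, ← ih (s + 1)]
    by_cases hx : q x
    · simp only [List.filter_cons, hx, if_true, List.map_cons, List.getLast?_cons]
      cases h : (((PySem.List.enumerate xs (s + 1)).filter (fun p => q p.2)).map (·.1)).getLast? <;>
        simp [h, Option.or]
    · simp only [List.filter_cons, hx]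
      cases h : (((PySem.List.enumerate xs (s + 1)).filter (fun p => q p.2)).map (·.1)).getLast?
      · simp [h, Option.or]
      · simp [h, Option.or]

theorem default_cam_index_py_eq (names : List String) :
    default_cam_index_py names = default_cam_index_py_alt names := by
  unfold default_cam_index_py default_cam_index_py_alt
  rw [foldl_camStep]
  simp only [Option.none_or, Option.or_none]
  by_cases hm : "conv4_block24_concat" ∈ names
  · have h1 : (PySem.List.index? names "conv4_block24_concat").isSome :=
      (PySem.List.index?_isSome_iff _ _).mpr hm
    have hf := firstIdx_eq_index? names 0
    cases hidx : PySem.List.index? names "conv4_block24_concat" with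
    | none => rw [hidx] at h1; simp at h1
    | some k =>
      rw [hidx] at hf
      simp at hf
      simp [hm, hf]
  · have h1 : PySem.List.index? names "conv4_block24_concat" = none := by
      cases hidx : PySem.List.index? names "conv4_block24_concat" with
      | none => rfl
      | some k => exact absurd ((PySem.List.index?_isSome_iff _ _).mp (by rw [hidx]; rfl)) hm
    have hf := firstIdx_eq_index? names 0
    rw [h1] at hf
    simp at hf
    have h4 := lastIdx_eq_getLast? q4 names 0
    have h5 := lastIdx_eq_getLast? q5 names 0
    simp only [q4] at h4
    simp only [q5] at h5
    simp only [hm, if_false, hf]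
    cases hc4 : lastIdx q4 names 0 with
    | some i =>
      rw [hc4] at h4
      have hne := List.getLast?_isSome.mp (by rw [h4]; rfl)
      rw [if_pos hne, h4]
      rfl
    | none =>
      rw [hc4] at h4
      have hnil := List.getLast?_eq_none_iff.mp h4
      rw [if_neg (not_not_intro hnil)]
      cases hc5 : lastIdx q5 names 0 with
      | some j =>
        rw [hc5] at h5
        have hne5 := List.getLast?_isSome.mp (by rw [h5]; rfl)
        rw [if_pos hne5, h5]
        rfl
      | none =>
        rw [hc5] at h5
        have hnil5 := List.getLast?_eq_none_iff.mp h5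
        rw [if_neg (not_not_intro hnil5)]

-- ===== VERDICT (by name: the statement is the Claim_ definition above) =====
theorem default_cam_index_py_spec : Claim_equal_default_cam_index_py := by
  intro names _
  unfold Spec_default_cam_index_py
  exact default_cam_index_py_eq names
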